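-- pv_equiv track=rewrite | github.com/coraharmonica/blisscribe | main/parse_lexica.py | parseAlphabetic
-- ===== SOURCE A (Python) =====
-- def trimWhitespace(word):
--     """
--     Trims empty space(s) from start and end of given word.
--
--     e.g. trimWhitespace(" full moon  ") -> "full moon"
--
--     :param word: str, word to trim whitespace(s) from
--     :return: str, word with whitespace(s) trimmed
--     """
--     return word.strip(" ")
--
-- def parseAlphabetic(word):
--     """
--     Parses the given non-alphabetic word into an
--     alphabetic-only version of the word.
--     ~
--     String cuts off at end of the first predicted lexeme.
--
--     e.g. parseAlphabetic("English (language)") -> "English"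
--
--     :param word: str, non-alphabetic word
--     :return: str, alphabetic version of input word
--     """
--     new_word = []
--     remove = False
--
--     for char in word:
--         if remove == False and char != "(":
--             new_word.append(char)
--         elif char == "(":
--             remove = True
--         elif char == ")":
--             remove = False
--
--     return trimWhitespace("".join(new_word))
-- ===== SOURCE B (Python) =====
-- def parseAlphabetic(word):
--     # Jump between parens with str.find instead of a per-char state machine.
--     parts = []
--     rest = word
--     while True:
--         i = rest.find("(")
--         if i < 0:
--             parts.append(rest)
--             break
--         parts.append(rest[:i])
--         j = rest.find(")", i + 1)
--         if j < 0:
--             break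
--         rest = rest[j + 1:]
--     return "".join(parts).strip(" ")
-- ===== Notes on version B (the rewrite author's own statement) =====
-- stated objective: faster
-- what changed: Replaces the per-character boolean state machine with a loop that jumps directly between parentheses using str.find and slicing, collecting whole kept segments instead of appending one character at a time.
import Mathlib
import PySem

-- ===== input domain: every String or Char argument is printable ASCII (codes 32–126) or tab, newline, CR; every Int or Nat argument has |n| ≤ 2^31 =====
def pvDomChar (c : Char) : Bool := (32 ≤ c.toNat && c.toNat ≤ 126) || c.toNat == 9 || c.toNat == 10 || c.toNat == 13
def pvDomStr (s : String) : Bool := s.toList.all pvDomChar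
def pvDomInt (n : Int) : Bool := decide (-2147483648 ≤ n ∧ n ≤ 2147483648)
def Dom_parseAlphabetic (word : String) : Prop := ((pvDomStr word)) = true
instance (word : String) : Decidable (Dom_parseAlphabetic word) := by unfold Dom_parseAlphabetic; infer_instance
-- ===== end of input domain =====

-- B replaces A's per-character remove-flag state machine by a segment loop that jumps
-- between parentheses with find/slicing; same return value, no speed claim.

-- ===== PORT A =====
-- the for-loop over word with the `remove` flag and the accumulating list
def pvALoop : List Char → Bool → List Char
  | [], _ => []
  | c :: cs, remove =>
    if remove = false ∧ c ≠ '(' then c :: pvALoop cs remove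
    else if c = '(' then pvALoop cs true
    else if c = ')' then pvALoop cs false
    else pvALoop cs remove

def parseAlphabetic (word : String) : String :=
  -- trimWhitespace(w) = w.strip(" ")
  PySem.Str.stripChars (String.ofList (pvALoop word.toList false)) " "

-- ===== PORT B =====
-- the while-loop: rest.find("(") = split at first '('; rest[j+1:] after the next ')'.
-- takeWhile/dropWhile on the char list are exactly rest[:i] / rest[i:] at the found index.
def pvBLoop (rest : List Char) : List Char :=
  match h : rest.dropWhile (· ≠ '(') with
  | [] => rest.takeWhile (· ≠ '(')              -- i < 0: append all of rest, stop
  | _ :: tl =>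
    match h2 : tl.dropWhile (· ≠ ')') with
    | [] => rest.takeWhile (· ≠ '(')            -- j < 0: drop the tail, stop
    | _ :: tl2 => rest.takeWhile (· ≠ '(') ++ pvBLoop tl2   -- continue after the ')'
termination_by rest.length
decreasing_by
  have hle := List.length_dropWhile_le (p := fun c => decide (c ≠ '(')) rest
  have hle2 := List.length_dropWhile_le (p := fun c => decide (c ≠ ')')) tl
  rw [h] at hle; rw [h2] at hle2
  simp at hle hle2; omega

def parseAlphabetic_alt (word : String) : String :=
  PySem.Str.stripChars (String.ofList (pvBLoop word.toList)) " "

-- ===== PRECONDITION & SPEC =====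
def Spec_parseAlphabetic (word : String) (out : String) : Prop := out = parseAlphabetic_alt word
instance (word : String) (out : String) : Decidable (Spec_parseAlphabetic word out) := by unfold Spec_parseAlphabetic; infer_instance

-- ===== CLAIM (what is proved, stated in full; the proofs are below) =====
def Claim_equal_parseAlphabetic : Prop := ∀ (word : String), Dom_parseAlphabetic word → Spec_parseAlphabetic word (parseAlphabetic word)

-- ===== LEMMAS AND PROOFS =====

-- A with remove = true skips up to and including the first ')'.
theorem pvALoop_true (xs : List Char) :
    pvALoop xs true = (match xs.dropWhile (· ≠ ')') with
      | [] => []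
      | _ :: tl => pvALoop tl false) := by
  induction xs with
  | nil => simp [pvALoop]
  | cons c cs ih =>
    by_cases hc : c = ')'
    · subst hc; simp [pvALoop, List.dropWhile]
    · have hstep : pvALoop (c :: cs) true = pvALoop cs true := by
        by_cases h1 : c = '(' <;> simp [pvALoop, hc, h1]
      have hp : (fun x => decide (x ≠ ')')) c = true := by simp [hc]
      rw [hstep, List.dropWhile_cons, if_pos hp]
      exact ih

-- A with remove = false copies up to the first '(' and then switches to remove = true.
theorem pvALoop_false (xs : List Char) :
    pvALoop xs false = xs.takeWhile (· ≠ '(') ++ (match xs.dropWhile (· ≠ '(') with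
      | [] => []
      | _ :: tl => pvALoop tl true) := by
  induction xs with
  | nil => simp [pvALoop]
  | cons c cs ih =>
    by_cases hc : c = '('
    · subst hc; simp [pvALoop, List.takeWhile, List.dropWhile]
    · have hp : (fun x => decide (x ≠ '(')) c = true := by simp [hc]
      have hA : pvALoop (c :: cs) false = c :: pvALoop cs false := by
        simp [pvALoop, hc]
      rw [hA, List.takeWhile_cons, List.dropWhile_cons, if_pos hp, if_pos hp, ih,
        List.cons_append]

-- non-dependent unfolding equations for pvBLoop
theorem pvBLoop_drop_nil (xs : List Char) (h : xs.dropWhile (· ≠ '(') = []) :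
    pvBLoop xs = xs.takeWhile (· ≠ '(') := by
  unfold pvBLoop
  split
  · rfl
  · rename_i a tl heq
    rw [h] at heq; cases heq

theorem pvBLoop_drop2_nil (xs : List Char) {a : Char} {tl : List Char}
    (h : xs.dropWhile (· ≠ '(') = a :: tl) (h2 : tl.dropWhile (· ≠ ')') = []) :
    pvBLoop xs = xs.takeWhile (· ≠ '(') := by
  unfold pvBLoop
  split
  · rfl
  · rename_i a' tl' heq
    rw [h] at heq; cases heq
    split
    · rfl
    · rename_i b tl2 heq2
      rw [h2] at heq2; cases heq2

theorem pvBLoop_step (xs : List Char) {a b : Char} {tl tl2 : List Char}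
    (h : xs.dropWhile (· ≠ '(') = a :: tl) (h2 : tl.dropWhile (· ≠ ')') = b :: tl2) :
    pvBLoop xs = xs.takeWhile (· ≠ '(') ++ pvBLoop tl2 := by
  rw [pvBLoop.eq_def]
  split
  · rename_i heq; rw [h] at heq; cases heq
  · rename_i a' tl' heq
    rw [h] at heq; cases heq
    split
    · rename_i heq2; rw [h2] at heq2; cases heq2
    · rename_i b' tl2' heq2
      rw [h2] at heq2; cases heq2; rfl

-- the two loops agree
theorem pvLoops_eq (xs : List Char) : pvALoop xs false = pvBLoop xs := by
  cases h : xs.dropWhile (· ≠ '(') with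
  | nil =>
    rw [pvALoop_false, h, pvBLoop_drop_nil xs h]; simp
  | cons a tl =>
    cases h2 : tl.dropWhile (· ≠ ')') with
    | nil =>
      rw [pvALoop_false, h, pvBLoop_drop2_nil xs h h2]
      simp only []
      rw [pvALoop_true, h2]; simp
    | cons b tl2 =>
      rw [pvALoop_false, h, pvBLoop_step xs h h2]
      simp only []
      rw [pvALoop_true, h2]
      have hred : (match b :: tl2 with | [] => ([] : List Char) | _ :: tl => pvALoop tl false)
          = pvALoop tl2 false := rfl
      rw [hred]
      have hlt : tl2.length < xs.length := by
        have hle := List.length_dropWhile_le (p := fun c => decide (c ≠ '(')) xs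
        have hle2 := List.length_dropWhile_le (p := fun c => decide (c ≠ ')')) tl
        rw [h] at hle; rw [h2] at hle2
        simp at hle hle2; omega
      rw [pvLoops_eq tl2]
termination_by xs.length

-- ===== VERDICT (by name: the statement is the Claim_ definition above) =====
theorem parseAlphabetic_spec : Claim_equal_parseAlphabetic := by
  intro word _
  unfold Spec_parseAlphabetic parseAlphabetic parseAlphabetic_alt
  rw [pvLoops_eq]
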